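-- pv_equiv track=rewrite | github.com/Devalent/aws-realtime-predictions | infrastructure/pipeline/preprocess.py | codes_dictionary_one
-- ===== SOURCE A (Python) =====
-- def codes_dictionary_one(unique_values):
--   dic = {}
--   count = 0
--   for i in unique_values:
--     if i in dic:
--       count += 0
--     else:
--       if i == 0 or i == '0,0':
--         dic[i] = 0
--       else:
--         dic[i] = count
--         count += 1
--
--   return dic
-- ===== SOURCE B (Python) =====
-- def codes_dictionary_one(unique_values):
--   uniq = list(dict.fromkeys(unique_values))
--   non_sentinels = [v for v in uniq if v != 0 and v != '0,0']
--   codes = {v: c for c, v in enumerate(non_sentinels)}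
--   return {v: codes.get(v, 0) for v in uniq}
-- ===== Notes on version B (the rewrite author's own statement) =====
-- stated objective: simpler
-- what changed: Replaces A's single stateful loop (membership test + counter that skips the sentinel) by a pipeline of comprehensions: order-preserving dedup via dict.fromkeys, filter out the '0,0' sentinel, number the remainder with enumerate into a lookup dict, and rebuild the result dict by lookup with default 0.
import Mathlib
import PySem

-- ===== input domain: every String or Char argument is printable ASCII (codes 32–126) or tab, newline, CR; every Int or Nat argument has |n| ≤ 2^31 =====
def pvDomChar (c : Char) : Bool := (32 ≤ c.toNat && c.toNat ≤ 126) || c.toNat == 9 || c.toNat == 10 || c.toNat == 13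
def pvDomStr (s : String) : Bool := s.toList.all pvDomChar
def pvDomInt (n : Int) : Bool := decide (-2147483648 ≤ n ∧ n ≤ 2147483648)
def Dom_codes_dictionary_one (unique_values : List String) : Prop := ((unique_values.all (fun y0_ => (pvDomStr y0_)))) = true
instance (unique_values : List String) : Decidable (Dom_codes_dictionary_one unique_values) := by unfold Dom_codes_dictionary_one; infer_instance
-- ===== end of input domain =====

-- B replaces A's one stateful counter-and-membership loop by comprehensions: dedup, filter
-- out the sentinel, number the rest with enumerate, rebuild the dict by lookup (objective: simpler).

-- ===== PORT A =====
-- one fold carrying (dic, count); 'i == 0' is always False for the str elements of the domain,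
-- so the sentinel test is i == '0,0' alone ('count += 0' leaves the state unchanged)
def codes_dictionary_one (unique_values : List String) : List (String × Int) :=
  (unique_values.foldl
    (fun (st : PySem.Dict String Int × Int) i =>
      if st.1.contains i then st
      else if i = "0,0" then (st.1.insert i 0, st.2)
      else (st.1.insert i st.2, st.2 + 1))
    (PySem.Dict.empty, 0)).1.items

-- ===== PORT B =====
-- Source B: uniq = list(dict.fromkeys(..)); non_sentinels drops '0,0' ('v != 0' is always True on str);
-- codes = {v: c for c, v in enumerate(non_sentinels)}; return {v: codes.get(v, 0) for v in uniq}
def codes_dictionary_one_alt (unique_values : List String) : List (String × Int) :=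
  let uniq := PySem.List.dedup unique_values
  let nonSentinels := uniq.filter (fun v => v != "0,0")
  let codes := (PySem.List.enumerate nonSentinels).foldl
      (fun (d : PySem.Dict String Int) p => d.insert p.2 p.1) PySem.Dict.empty
  (uniq.foldl (fun (d : PySem.Dict String Int) v => d.insert v (codes.getD v 0))
      PySem.Dict.empty).items

-- ===== PRECONDITION & SPEC =====
def Spec_codes_dictionary_one (unique_values : List String) (out : List (String × Int)) : Prop := out = codes_dictionary_one_alt unique_values
instance (unique_values : List String) (out : List (String × Int)) : Decidable (Spec_codes_dictionary_one unique_values out) := by unfold Spec_codes_dictionary_one; infer_instance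

-- ===== CLAIM (what is proved, stated in full; the proofs are below) =====
def Claim_equal_codes_dictionary_one : Prop := ∀ (unique_values : List String), Dom_codes_dictionary_one unique_values → Spec_codes_dictionary_one unique_values (codes_dictionary_one unique_values)

-- ===== LEMMAS AND PROOFS =====

-- the distinct values of xs that are not already in ks, in first-occurrence order
def pvFresh : List String → List String → List String
  | [], _ => []
  | x :: xs, ks => if ks.contains x then pvFresh xs ks else x :: pvFresh xs (ks ++ [x])

-- A's loop restricted to never-seen-before values
def pvLoopG : List String → PySem.Dict String Int → Int → PySem.Dict String Int × Int
  | [], d, c => (d, c)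
  | v :: vs, d, c =>
      if v = "0,0" then pvLoopG vs (d.insert v 0) c else pvLoopG vs (d.insert v c) (c + 1)

-- the (value, code) pairs A emits for a duplicate-free list, starting the counter at c
def pvAssign : List String → Int → List (String × Int)
  | [], _ => []
  | v :: vs, c =>
      if v = "0,0" then (v, 0) :: pvAssign vs c else (v, c) :: pvAssign vs (c + 1)

theorem pvSet_update_eq_fresh (xs ks : List String) :
    PySem.Set.update ks xs = ks ++ pvFresh xs ks := by
  induction xs generalizing ks with
  | nil => simp [PySem.Set.update, pvFresh]
  | cons x xs ih =>
      by_cases h : ks.contains x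
      · rw [PySem.Set.update, List.foldl_cons]
        simp only [PySem.Set.add, PySem.Set.contains, if_pos h]
        rw [pvFresh, if_pos h]
        exact ih ks
      · rw [PySem.Set.update, List.foldl_cons]
        simp only [PySem.Set.add, PySem.Set.contains, if_neg h]
        rw [pvFresh, if_neg h]
        have := ih (ks ++ [x])
        rw [PySem.Set.update] at this
        rw [this]
        simp

theorem pvDedup_eq_fresh (xs : List String) :
    PySem.List.dedup xs = pvFresh xs [] := by
  have := pvSet_update_eq_fresh xs []
  simpa [PySem.List.dedup, PySem.Set.ofList, PySem.Set.update, PySem.Set.empty] using this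

theorem pvFoldA_eq_loopG (xs : List String) (d : PySem.Dict String Int) (c : Int) :
    xs.foldl
      (fun (st : PySem.Dict String Int × Int) i =>
        if st.1.contains i then st
        else if i = "0,0" then (st.1.insert i 0, st.2)
        else (st.1.insert i st.2, st.2 + 1)) (d, c)
    = pvLoopG (pvFresh xs (PySem.Dict.keys d)) d c := by
  induction xs generalizing d c with
  | nil => simp [pvFresh, pvLoopG]
  | cons x xs ih =>
      simp only [List.foldl_cons]
      by_cases h : d.contains x
      · have hk : (PySem.Dict.keys d).contains x = true := by
          rw [PySem.Dict.contains_eq_decide_mem_keys] at h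
          simpa [List.contains_iff_mem] using of_decide_eq_true h
        rw [pvFresh, if_pos hk, if_pos h]
        exact ih d c
      · have h' : d.contains x = false := by simpa using h
        have hk : ¬ (PySem.Dict.keys d).contains x = true := by
          rw [PySem.Dict.contains_eq_decide_mem_keys] at h
          simp only [List.contains_iff_mem]
          simpa using h
        rw [pvFresh, if_neg hk, if_neg h]
        by_cases hs : x = "0,0"
        · rw [if_pos hs, pvLoopG, if_pos hs, ih,
              PySem.Dict.keys_insert_of_not_contains _ _ h']
        · rw [if_neg hs, pvLoopG, if_neg hs, ih,
              PySem.Dict.keys_insert_of_not_contains _ _ h']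

theorem pvLoopG_items (u : List String) (d : PySem.Dict String Int) (c : Int)
    (hfresh : ∀ v ∈ u, d.contains v = false) (hnd : u.Nodup) :
    (pvLoopG u d c).1.items = d.items ++ pvAssign u c := by
  induction u generalizing d c with
  | nil => simp [pvLoopG, pvAssign]
  | cons x us ih =>
      obtain ⟨hxnot, hnds⟩ := List.nodup_cons.mp hnd
      have hx : d.contains x = false := hfresh x (by simp)
      have hrest : ∀ w : Int, ∀ v ∈ us, (d.insert x w).contains v = false := by
        intro w v hv
        rw [PySem.Dict.contains_insert]
        have hvx : v ≠ x := fun hh => hxnot (hh ▸ hv)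
        simp [hvx, hfresh v (by simp [hv])]
      by_cases hs : x = "0,0"
      · rw [pvLoopG, if_pos hs, ih _ _ (hrest 0) hnds,
            PySem.Dict.items_insert_of_not_contains _ _ hx]
        simp [pvAssign, hs]
      · rw [pvLoopG, if_neg hs, ih _ _ (hrest c) hnds,
            PySem.Dict.items_insert_of_not_contains _ _ hx]
        simp [pvAssign, hs]

theorem pvEnum_get? (l : List String) (k : Int) (d : PySem.Dict String Int)
    (hfresh : ∀ x ∈ l, d.contains x = false) (hnd : l.Nodup) (v : String) :
    ((PySem.List.enumerate l k).foldl
        (fun (d : PySem.Dict String Int) p => d.insert p.2 p.1) d).get? v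
    = match List.idxOf? v l with
      | some n => some (k + n)
      | none => d.get? v := by
  induction l generalizing k d with
  | nil => simp [PySem.List.enumerate]
  | cons x xs ih =>
      obtain ⟨hxnot, hnds⟩ := List.nodup_cons.mp hnd
      rw [PySem.List.enumerate]
      simp only [List.foldl_cons]
      have hx : d.contains x = false := hfresh x (by simp)
      have hrest : ∀ y ∈ xs, (d.insert x k).contains y = false := by
        intro y hy
        rw [PySem.Dict.contains_insert]
        have : y ≠ x := fun h => hxnot (h ▸ hy)
        simp [this, hfresh y (by simp [hy])]
      rw [ih (k + 1) _ hrest hnds]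
      by_cases hv : v = x
      · subst hv
        have hnone : List.idxOf? v xs = none := List.idxOf?_eq_none_iff.mpr hxnot
        rw [hnone, List.idxOf?_cons]
        simp [PySem.Dict.get?_insert_self]
      · rw [List.idxOf?_cons, if_neg (by simpa using fun h => hv h.symm)]
        cases hidx : List.idxOf? v xs with
        | none => simpa [hidx] using PySem.Dict.get?_insert_of_ne d k hv
        | some n =>
            simp only [Option.map_some]
            congr 1
            push_cast
            ring

theorem pvAssign_eq_map (u : List String) (c : Int) (hnd : u.Nodup) :
    pvAssign u c = u.map (fun v =>
      (v, if v = "0,0" then 0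
          else c + ((List.idxOf? v (u.filter (fun w => w != "0,0"))).getD 0 : Int))) := by
  induction u generalizing c with
  | nil => simp [pvAssign]
  | cons x us ih =>
      obtain ⟨hxnot, hnds⟩ := List.nodup_cons.mp hnd
      by_cases hs : x = "0,0"
      · rw [pvAssign, if_pos hs]
        have hf : (x :: us).filter (fun w => w != "0,0") = us.filter (fun w => w != "0,0") := by
          simp [hs]
        rw [hf, ih c hnds]
        simp [hs]
      · have hf : (x :: us).filter (fun w => w != "0,0")
            = x :: us.filter (fun w => w != "0,0") := by
          simp [hs]
        rw [pvAssign, if_neg hs, ih (c + 1) hnds, hf]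
        simp only [List.map_cons, List.cons.injEq]
        constructor
        · simp [hs, List.idxOf?_cons]
        · apply List.map_congr_left
          intro v hv
          have hvx : v ≠ x := fun h => hxnot (h ▸ hv)
          by_cases hvs : v = "0,0"
          · simp [hvs]
          · have hvmem : v ∈ us.filter (fun w => w != "0,0") := by
              simp [List.mem_filter, hv, hvs]
            obtain ⟨n, hn⟩ := Option.isSome_iff_exists.mp (List.isSome_idxOf?.mpr hvmem)
            rw [List.idxOf?_cons] at *
            simp only [hvs, if_false]
            rw [if_neg (by simpa using fun h => hvx h.symm), hn]
            simp only [Option.map_some, Option.getD_some, Prod.mk.injEq, true_and]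
            push_cast
            ring

-- ===== VERDICT (by name: the statement is the Claim_ definition above) =====
theorem codes_dictionary_one_spec : Claim_equal_codes_dictionary_one := by
  intro xs _
  have hnd : (PySem.List.dedup xs).Nodup := PySem.List.nodup_dedup xs
  have hndf : ((PySem.List.dedup xs).filter (fun w => w != "0,0")).Nodup := hnd.filter _
  unfold Spec_codes_dictionary_one codes_dictionary_one codes_dictionary_one_alt
  dsimp only
  rw [pvFoldA_eq_loopG]
  rw [PySem.Dict.keys_empty, ← pvDedup_eq_fresh]
  rw [pvLoopG_items _ _ _ (fun v _ => by simp [pysem]) hnd]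
  rw [PySem.Dict.items_foldl_insert_fresh (PySem.List.dedup xs) (fun v => v) _ _
        (fun a _ => by simp [pysem]) (by rw [List.map_id']; exact hnd)]
  simp only [PySem.Dict.empty, List.nil_append]
  rw [pvAssign_eq_map _ 0 hnd]
  apply List.map_congr_left
  intro v hv
  rw [PySem.Dict.getD_eq_get?_getD,
      pvEnum_get? _ 0 _ (fun x _ => by simp [pysem]) hndf v]
  have hv' : v ∈ xs := by simpa [pysem] using hv
  by_cases hvs : v = "0,0"
  · subst hvs
    have hnone : List.idxOf? "0,0" ((PySem.List.dedup xs).filter (fun w => w != "0,0")) = none := by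
      apply List.idxOf?_eq_none_iff.mpr
      simp [List.mem_filter]
    simp only [PySem.List.dedup_eq_ofList] at hnone
    simp [hnone, PySem.Dict.get?]
  · have hvmem : v ∈ (PySem.List.dedup xs).filter (fun w => w != "0,0") := by
      simp only [List.mem_filter]
      exact ⟨hv, by simp [hvs]⟩
    obtain ⟨n, hn⟩ := Option.isSome_iff_exists.mp (List.isSome_idxOf?.mpr hvmem)
    simp only [PySem.List.dedup_eq_ofList] at hn
    simp [hvs, hn]
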